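-- pv_equiv track=rewrite | github.com/kkorta/ASD | DynamicProgramming/matrioszki.py | matrioszki
-- ===== SOURCE A (Python) =====
-- def matrioszki(T):
--     T.sort(reverse=True)
--     n = len(T)
--     f = [1] * n
--     for i in range(1, n):
--         for j in range(i):
--             if T[i][1] < T[j][1] and f[i] < f[j] + 1 and T[i][0] != T[j][0]:
--                 f[i] = f[j] + 1
--
--     return max(f)
-- ===== SOURCE B (Python) =====
-- def matrioszki(T):
--     # Sort by (width asc, height desc), then greedy patience-style tails:
--     # tails[k] = smallest possible height ending an increasing-in-both chain
--     # of length k+1.  Answer = len(tails).  (Does not mutate T, unlike A,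
--     # which sorts T in place; return value is the same.)
--     S = sorted(T, key=lambda p: (p[0], -p[1]))
--     tails = []
--     for _, h in S:
--         k = 0
--         while k < len(tails) and tails[k] < h:
--             k += 1
--         if k == len(tails):
--             tails.append(h)
--         else:
--             tails[k] = h
--     return len(tails)
-- ===== Notes on version B (the rewrite author's own statement) =====
-- stated objective: faster
-- what changed: Replaces the O(n^2) longest-chain DP table with a sort by (width asc, height desc) followed by patience-style maintenance of a 'tails' list (smallest ending height per chain length), scanning only the tails list (whose length is the answer) per element instead of all previous elements.
import Mathlib
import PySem

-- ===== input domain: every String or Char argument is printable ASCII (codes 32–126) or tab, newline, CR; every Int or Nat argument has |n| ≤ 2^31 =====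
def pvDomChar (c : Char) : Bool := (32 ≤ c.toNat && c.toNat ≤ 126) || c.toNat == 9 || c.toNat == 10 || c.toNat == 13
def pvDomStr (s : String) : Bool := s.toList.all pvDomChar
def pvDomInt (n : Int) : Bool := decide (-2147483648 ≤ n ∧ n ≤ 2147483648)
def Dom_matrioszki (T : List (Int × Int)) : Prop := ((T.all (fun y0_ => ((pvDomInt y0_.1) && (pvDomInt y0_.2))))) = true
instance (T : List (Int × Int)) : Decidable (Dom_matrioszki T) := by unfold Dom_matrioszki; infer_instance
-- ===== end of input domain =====

-- B replaces A's O(n^2) longest-chain DP with a sort by (width asc, height desc) plus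
-- patience-style maintenance of a 'tails' list; equivalence is about the RETURN value
-- only (A sorts its argument in place, B does not mutate it).

-- ===== PORT A =====
def matrioszki (T : List (Int × Int)) : Int :=
  -- T.sort(reverse=True): Python compares the tuples lexicographically
  let Ts := PySem.List.sorted2 T Prod.fst Prod.snd true
  let n : Int := PySem.List.len Ts
  let f0 : List Int := PySem.List.pyRepeat [1] n          -- f = [1] * n
  let f1 := (PySem.List.pyRange 1 n 1).foldl (fun f i =>
    (PySem.List.pyRange 0 i 1).foldl (fun f j =>
      if (PySem.List.pyGetD Ts i (0, 0)).2 < (PySem.List.pyGetD Ts j (0, 0)).2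
          ∧ PySem.List.pyGetD f i 0 < PySem.List.pyGetD f j 0 + 1
          ∧ (PySem.List.pyGetD Ts i (0, 0)).1 ≠ (PySem.List.pyGetD Ts j (0, 0)).1
      then PySem.List.pySetD f i (PySem.List.pyGetD f j 0 + 1)
      else f) f) f0
  -- max(f) raises ValueError on an empty list; Pre_matrioszki excludes T = []
  (PySem.List.max? f1 (fun x => x)).getD 0

-- ===== PORT B =====
-- 'k = 0; while k < len(tails) and tails[k] < h: k += 1' — the count of leading
-- elements < h, as the obvious structural recursion over the list
def pvScan (tails : List Int) (h : Int) : Nat :=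
  match tails with
  | [] => 0
  | t :: ts => if t < h then pvScan ts h + 1 else 0

def matrioszki_alt (T : List (Int × Int)) : Int :=
  let S := PySem.List.sorted2 T Prod.fst (fun p => -p.2) false
  let tails := S.foldl (fun tails p =>
    let k := pvScan tails p.2
    if k = tails.length then tails ++ [p.2]
    else PySem.List.pySetD tails (k : Int) p.2) []
  PySem.List.len tails

-- ===== PRECONDITION & SPEC =====
-- Pre_ excludes only the empty list, on which A raises ValueError (max of an empty sequence).
def Pre_matrioszki (T : List (Int × Int)) : Prop := T ≠ []
instance (T : List (Int × Int)) : Decidable (Pre_matrioszki T) := by unfold Pre_matrioszki; infer_instance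
def pvWitness_matrioszki : (List (Int × Int)) := [(1, 1), (2, 2)]

def Spec_matrioszki (T : List (Int × Int)) (out : Int) : Prop := out = matrioszki_alt T
instance (T : List (Int × Int)) (out : Int) : Decidable (Spec_matrioszki T out) := by unfold Spec_matrioszki; infer_instance

-- ===== CLAIM (what is proved, stated in full; the proofs are below) =====
def Claim_equal_matrioszki : Prop := ∀ (T : List (Int × Int)), Dom_matrioszki T → Pre_matrioszki T → Spec_matrioszki T (matrioszki T)

-- ===== LEMMAS AND PROOFS =====

def pvSA (T : List (Int × Int)) : List (Int × Int) :=
  PySem.List.sorted T (fun x => toLex (x.1, x.2)) true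
def pvSB (T : List (Int × Int)) : List (Int × Int) :=
  PySem.List.sorted T (fun x => toLex (x.1, -x.2)) false
def pvStepA (a b : Int × Int) : Prop := b.2 < a.2 ∧ b.1 ≠ a.1
def pvStepB (a b : Int × Int) : Prop := a.2 < b.2
def pvRel (a b : Int × Int) : Prop := b.1 < a.1 ∧ b.2 < a.2

lemma pv_chain_and {α : Type} {R S : α → α → Prop} {l : List α}
    (hc : List.IsChain R l) (hp : List.Pairwise S l) :
    List.IsChain (fun a b => R a b ∧ S a b) l := by
  induction hc with
  | nil => exact List.IsChain.nil
  | singleton a => exact List.IsChain.singleton a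
  | cons_cons hR _ ih =>
    rcases List.pairwise_cons.mp hp with ⟨hS, hp'⟩
    exact List.IsChain.cons_cons ⟨hR, hS _ (by simp)⟩ (ih hp')

-- a pvStepA-chain sublist of the A-order is pairwise strictly-decreasing in both coordinates
lemma pv_chainA_pairwise (T : List (Int × Int)) (c : List (Int × Int))
    (hs : c.Sublist (pvSA T)) (hc : List.IsChain pvStepA c) : c.Pairwise pvRel := by
  have hpw : c.Pairwise (fun a b => toLex (b.1, b.2) ≤ toLex (a.1, a.2)) :=
    List.Pairwise.sublist hs (PySem.List.sorted_pairwise_rev T _)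
  have hch : List.IsChain pvRel c := by
    refine (pv_chain_and hc hpw).imp ?_
    rintro a b ⟨⟨h2, h1⟩, hle⟩
    rcases Prod.Lex.toLex_le_toLex.mp hle with h | ⟨h, _⟩
    · exact ⟨h, h2⟩
    · exact absurd h h1
  haveI : Trans pvRel pvRel pvRel := ⟨fun h1 h2 => ⟨h2.1.trans h1.1, h2.2.trans h1.2⟩⟩
  exact List.isChain_iff_pairwise.mp hch

lemma pv_chainB_pairwise (T : List (Int × Int)) (c : List (Int × Int))
    (hs : c.Sublist (pvSB T)) (hc : List.IsChain pvStepB c) :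
    c.Pairwise (fun a b => pvRel b a) := by
  have hpw : c.Pairwise (fun a b => toLex (a.1, -a.2) ≤ toLex (b.1, -b.2)) :=
    List.Pairwise.sublist hs (PySem.List.sorted_pairwise T _)
  have hch : List.IsChain (fun a b => pvRel b a) c := by
    refine (pv_chain_and hc hpw).imp ?_
    rintro a b ⟨h2, hle⟩
    rcases Prod.Lex.toLex_le_toLex.mp hle with h | ⟨h, h'⟩
    · exact ⟨h, h2⟩
    · exact absurd h2 (by unfold pvStepB; omega)
  haveI : Trans (fun a b : Int × Int => pvRel b a) (fun a b => pvRel b a) (fun a b => pvRel b a) :=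
    ⟨fun h1 h2 => ⟨h1.1.trans h2.1, h1.2.trans h2.2⟩⟩
  exact List.isChain_iff_pairwise.mp hch

-- a pairwise pvRel chain is a pvStepA-chain sublist of the A-order
lemma pv_pairwise_to_A (T : List (Int × Int)) (c : List (Int × Int))
    (hsub : c.Subperm T) (hp : c.Pairwise pvRel) :
    c.Sublist (pvSA T) ∧ List.IsChain pvStepA c := by
  constructor
  · haveI : Std.Antisymm (fun a b : Int × Int => toLex (b.1, b.2) ≤ toLex (a.1, a.2)) := by
      constructor
      intro a b h1 h2
      have := le_antisymm h1 h2
      have : (b.1, b.2) = (a.1, a.2) := toLex.injective this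
      cases a; cases b; simp_all
    refine List.sublist_of_subperm_of_pairwise
      (hsub.trans (PySem.List.sorted_perm T _ true).symm.subperm) ?_
      (PySem.List.sorted_pairwise_rev T _)
    refine hp.imp (fun {a b} h => le_of_lt ((Prod.Lex.toLex_lt_toLex (x := (b.1, b.2)) (y := (a.1, a.2))).mpr (Or.inl h.1)))
  · exact hp.isChain.imp (fun a b h => ⟨h.2, ne_of_lt h.1⟩)

lemma pv_pairwise_to_B (T : List (Int × Int)) (c : List (Int × Int))
    (hsub : c.Subperm T) (hp : c.Pairwise (fun a b => pvRel b a)) :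
    c.Sublist (pvSB T) ∧ List.IsChain pvStepB c := by
  constructor
  · haveI : Std.Antisymm (fun a b : Int × Int => toLex (a.1, -a.2) ≤ toLex (b.1, -b.2)) := by
      constructor
      intro a b h1 h2
      have := le_antisymm h1 h2
      have : (a.1, -a.2) = (b.1, -b.2) := toLex.injective this
      cases a; cases b; simp_all
    refine List.sublist_of_subperm_of_pairwise
      (hsub.trans (PySem.List.sorted_perm T _ false).symm.subperm) ?_
      (PySem.List.sorted_pairwise T _)
    refine hp.imp (fun {a b} h => le_of_lt ((Prod.Lex.toLex_lt_toLex (x := (a.1, -a.2)) (y := (b.1, -b.2))).mpr (Or.inl h.1)))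
  · exact hp.isChain.imp (fun a b h => h.2)

lemma pv_chain_A_to_B (T : List (Int × Int)) (c : List (Int × Int))
    (hs : c.Sublist (pvSA T)) (hc : List.IsChain pvStepA c) :
    c.reverse.Sublist (pvSB T) ∧ List.IsChain pvStepB c.reverse := by
  have hp := pv_chainA_pairwise T c hs hc
  have hsub : c.reverse.Subperm T :=
    ((c.reverse_perm).subperm).trans ((hs.subperm).trans (PySem.List.sorted_perm T _ true).subperm)
  exact pv_pairwise_to_B T c.reverse hsub (List.pairwise_reverse.mpr hp)

lemma pv_chain_B_to_A (T : List (Int × Int)) (c : List (Int × Int))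
    (hs : c.Sublist (pvSB T)) (hc : List.IsChain pvStepB c) :
    c.reverse.Sublist (pvSA T) ∧ List.IsChain pvStepA c.reverse := by
  have hp := pv_chainB_pairwise T c hs hc
  have hsub : c.reverse.Subperm T :=
    ((c.reverse_perm).subperm).trans ((hs.subperm).trans (PySem.List.sorted_perm T _ false).subperm)
  exact pv_pairwise_to_A T c.reverse hsub (List.pairwise_reverse.mpr hp)

def pvTStep (tails : List Int) (p : Int × Int) : List Int :=
  let k := pvScan tails p.2
  if k = tails.length then tails ++ [p.2]
  else PySem.List.pySetD tails (k : Int) p.2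

lemma pvScan_le (t : List Int) (h : Int) : pvScan t h ≤ t.length := by
  induction t with
  | nil => simp [pvScan]
  | cons a ts ih => simp only [pvScan]; split <;> simp <;> omega

lemma pvScan_prefix_lt (t : List Int) (h : Int) :
    ∀ j (hj : j < t.length), j < pvScan t h → t[j] < h := by
  induction t with
  | nil => simp
  | cons a ts ih =>
    intro j hj hlt
    simp only [pvScan] at hlt
    split at hlt
    · cases j with
      | zero => simpa using ‹a < h›
      | succ j' => exact ih j' (by simpa using hj) (by omega)
    · omega

lemma pvScan_ge (t : List Int) (h : Int) (hk : pvScan t h < t.length) :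
    h ≤ t[pvScan t h] := by
  induction t with
  | nil => simp at hk
  | cons a ts ih =>
    simp only [pvScan] at hk ⊢
    by_cases hc : a < h
    · simp only [if_pos hc] at hk ⊢
      rw [List.getElem_cons_succ]
      exact ih (by simpa using hk)
    · simp only [if_neg hc]
      simpa using le_of_not_gt hc

def pvInvB (pre : List (Int × Int)) (tails : List Int) : Prop :=
  tails.Pairwise (· < ·)
  ∧ (tails = [] → pre = [])
  ∧ (∀ k (hk : k < tails.length), ∃ m x, (m ++ [x]).Sublist pre ∧ List.IsChain pvStepB (m ++ [x])
      ∧ m.length = k ∧ x.2 = tails[k])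
  ∧ (∀ m x, (m ++ [x]).Sublist pre → List.IsChain pvStepB (m ++ [x]) →
      ∃ (hlt : m.length < tails.length), tails[m.length] ≤ x.2)

lemma pv_concat_sublist_concat {α : Type} {m pre : List α} {x p : α}
    (h : (m ++ [x]).Sublist (pre ++ [p])) :
    (m ++ [x]).Sublist pre ∨ (x = p ∧ m.Sublist pre) := by
  have hr : (x :: m.reverse).Sublist (p :: pre.reverse) := by
    simpa using h.reverse
  rcases List.sublist_cons_iff.mp hr with h' | ⟨r, hr1, hr2⟩
  · left
    have := h'.reverse
    simpa using this
  · right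
    obtain ⟨hx, hm⟩ : x = p ∧ m.reverse = r := by
      constructor <;> simp_all
    subst hx
    refine ⟨rfl, ?_⟩
    have := hr2.reverse
    rw [← hm] at this
    simpa using this

lemma pv_pairwise_getElem_mono {t : List Int} (hp : t.Pairwise (· < ·))
    {i j : Nat} (hij : i ≤ j) (hj : j < t.length) : t[i]'(by omega) ≤ t[j] := by
  rcases Nat.lt_or_ge i j with h | h
  · exact le_of_lt ((List.pairwise_iff_getElem.mp hp) i j (by omega) hj h)
  · have : i = j := by omega
    subst this; rfl

lemma pv_chain_snocB (m : List (Int × Int)) (x p : Int × Int)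
    (hc : List.IsChain pvStepB (m ++ [x])) (hstep : pvStepB x p) :
    List.IsChain pvStepB ((m ++ [x]) ++ [p]) := by
  rw [List.isChain_append]
  refine ⟨hc, List.IsChain.singleton p, ?_⟩
  intro a ha b hb
  simp at ha hb
  subst ha hb
  exact hstep

lemma pvInvB_step (pre : List (Int × Int)) (tails : List Int) (p : Int × Int)
    (hInv : pvInvB pre tails) : pvInvB (pre ++ [p]) (pvTStep tails p) := by
  obtain ⟨hpw, hne, hwit, hub⟩ := hInv
  have hkle : pvScan tails p.2 ≤ tails.length := pvScan_le tails p.2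
  have hpref : ∀ j (hj : j < tails.length), j < pvScan tails p.2 → tails[j] < p.2 :=
    pvScan_prefix_lt tails p.2
  unfold pvTStep
  by_cases hk : pvScan tails p.2 = tails.length
  · -- append
    rw [if_pos hk]
    refine ⟨?_, by simp, ?_, ?_⟩
    · rw [List.pairwise_append]
      refine ⟨hpw, List.pairwise_singleton _ _, ?_⟩
      intro a ha b hb
      rcases List.mem_iff_getElem.mp ha with ⟨j, hj, rfl⟩
      have hb' : b = p.2 := by simpa using hb
      subst hb'
      exact hpref j hj (by omega)
    · intro k' hk'
      rw [List.length_append, List.length_singleton] at hk'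
      rcases Nat.lt_or_ge k' tails.length with hlt | hge
      · obtain ⟨m, x, hs, hc, hlen, hx⟩ := hwit k' hlt
        refine ⟨m, x, hs.trans (List.sublist_append_left _ _), hc, hlen, ?_⟩
        rw [List.getElem_append_left hlt]
        exact hx
      · have hk'' : k' = tails.length := by omega
        subst hk''
        have hget : (tails ++ [p.2])[tails.length]'(by simp) = p.2 := by simp
        rcases Nat.eq_zero_or_pos tails.length with h0 | hpos
        · refine ⟨[], p, ?_, by simpa using List.IsChain.singleton p, by simpa using h0.symm, by simp [hget]⟩
          simpa using (List.nil_sublist pre).append (List.Sublist.refl [p])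
        · obtain ⟨m, x, hs, hc, hlen, hx⟩ := hwit (tails.length - 1) (by omega)
          have hstep : pvStepB x p := by
            have := hpref (tails.length - 1) (by omega) (by omega)
            show x.2 < p.2
            omega
          refine ⟨m ++ [x], p, hs.append (List.Sublist.refl [p]), pv_chain_snocB m x p hc hstep,
            by simp [hlen]; omega, by simp [hget]⟩
    · intro m x hs hc
      rcases pv_concat_sublist_concat hs with hs' | ⟨hxp, hs'⟩
      · obtain ⟨hlt, hle⟩ := hub m x hs' hc
        refine ⟨by simp; omega, ?_⟩
        rw [List.getElem_append_left hlt]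
        exact hle
      · subst hxp
        rcases List.eq_nil_or_concat' m with rfl | ⟨m', y, rfl⟩
        · refine ⟨by simp, ?_⟩
          rcases Nat.eq_zero_or_pos tails.length with h0 | hpos
          · simp [h0]
          · rw [List.getElem_append_left (by simpa using hpos)]
            exact le_of_lt (hpref 0 (by omega) (by omega))
        · have hdec := List.isChain_append.mp hc
          have hstep : y.2 < x.2 := by
            have := hdec.2.2
            simp at this
            exact this
          obtain ⟨hlt, hle⟩ := hub m' y hs' hdec.1
          refine ⟨by simp; omega, ?_⟩
          rcases Nat.lt_or_ge (m' ++ [y]).length tails.length with hcase | hcase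
          · rw [List.getElem_append_left hcase]
            exact le_of_lt (hpref _ (by omega) (by omega))
          · have hlen' : (m' ++ [y]).length = tails.length := by simp at hcase ⊢; omega
            simp only [hlen']
            simp
  · -- replace
    have hklt : pvScan tails p.2 < tails.length := by omega
    have hge : p.2 ≤ tails[pvScan tails p.2] := pvScan_ge tails p.2 hklt
    rw [if_neg hk, PySem.List.pySetD_natCast]
    refine ⟨?_, ?_, ?_, ?_⟩
    · rw [List.pairwise_iff_getElem]
      intro i j hi hj hij
      simp only [List.length_set] at hi hj
      have hpm := List.pairwise_iff_getElem.mp hpw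
      rw [List.getElem_set, List.getElem_set]
      split
      · next hik =>
        rw [if_neg (by omega)]
        have hkj : pvScan tails p.2 < j := by omega
        exact lt_of_le_of_lt hge (hpm _ _ hklt hj hkj)
      · next hik =>
        split
        · next hjk => exact hpref i hi (by omega)
        · exact hpm _ _ hi hj hij
    · intro habs
      rw [List.set_eq_nil_iff] at habs
      subst habs
      simp at hklt
    · intro k' hk'
      simp only [List.length_set] at hk'
      by_cases hk'' : k' = pvScan tails p.2
      · have hget : (tails.set (pvScan tails p.2) p.2)[k']'(by simpa using hk') = p.2 := by
          rw [List.getElem_set, if_pos hk''.symm]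
        rcases Nat.eq_zero_or_pos k' with h0 | hpos
        · refine ⟨[], p, ?_, by simpa using List.IsChain.singleton p, by simpa using h0.symm, by simp [hget]⟩
          simpa using (List.nil_sublist pre).append (List.Sublist.refl [p])
        · obtain ⟨m, x, hs, hc, hlen, hx⟩ := hwit (k' - 1) (by omega)
          have hstep : pvStepB x p := by
            have := hpref (k' - 1) (by omega) (by omega)
            show x.2 < p.2
            omega
          refine ⟨m ++ [x], p, hs.append (List.Sublist.refl [p]), pv_chain_snocB m x p hc hstep,
            by simp [hlen]; omega, by simp [hget]⟩
      · obtain ⟨m, x, hs, hc, hlen, hx⟩ := hwit k' hk'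
        refine ⟨m, x, hs.trans (List.sublist_append_left _ _), hc, hlen, ?_⟩
        rw [List.getElem_set, if_neg (by omega)]
        exact hx
    · intro m x hs hc
      rcases pv_concat_sublist_concat hs with hs' | ⟨hxp, hs'⟩
      · obtain ⟨hlt, hle⟩ := hub m x hs' hc
        refine ⟨by simpa using hlt, ?_⟩
        rw [List.getElem_set]
        split
        · next hmk =>
          have hmono : tails[pvScan tails p.2] ≤ tails[m.length]'hlt :=
            pv_pairwise_getElem_mono hpw (le_of_eq hmk) hlt
          exact le_trans (le_trans hge hmono) hle
        · exact hle
      · subst hxp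
        rcases List.eq_nil_or_concat' m with rfl | ⟨m', y, rfl⟩
        · refine ⟨by simp only [List.length_nil, List.length_set]; omega, ?_⟩
          simp only [List.length_nil]
          rw [List.getElem_set]
          split
          · exact le_refl _
          · next h0 =>
            exact le_of_lt (hpref 0 (by omega) (by omega))
        · have hdec := List.isChain_append.mp hc
          have hstep : y.2 < x.2 := by
            have := hdec.2.2
            simp at this
            exact this
          obtain ⟨hlt, hle⟩ := hub m' y hs' hdec.1
          have hm'k : m'.length < pvScan tails x.2 := by
            by_contra hcon
            have hmono : tails[pvScan tails x.2] ≤ tails[m'.length] :=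
              pv_pairwise_getElem_mono hpw (by omega) hlt
            omega
          refine ⟨by simp; omega, ?_⟩
          rw [List.getElem_set]
          split
          · next heq => exact le_refl _
          · next hne' =>
            have hlt2 : (m' ++ [y]).length < pvScan tails x.2 := by simp at hne' ⊢; omega
            exact le_of_lt (hpref _ (by omega) hlt2)

lemma pvInvB_fold (S : List (Int × Int)) : ∀ pre tails, pvInvB pre tails →
    pvInvB (pre ++ S) (S.foldl pvTStep tails) := by
  induction S with
  | nil => intro pre tails h; simpa using h
  | cons p S ih =>
    intro pre tails h
    have h1 := pvInvB_step pre tails p h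
    have := ih (pre ++ [p]) (pvTStep tails p) h1
    simpa using this

lemma pvInvB_nil : pvInvB [] [] := by
  refine ⟨List.Pairwise.nil, fun _ => rfl, by simp, ?_⟩
  intro m x hs
  rw [List.sublist_nil] at hs
  simp at hs

lemma pvInvB_final (S : List (Int × Int)) : pvInvB S (S.foldl pvTStep []) := by
  simpa using pvInvB_fold S [] [] pvInvB_nil

lemma pv_chain_snoc {α : Type} {R : α → α → Prop} (m : List α) (x p : α)
    (hc : List.IsChain R (m ++ [x])) (hstep : R x p) :
    List.IsChain R ((m ++ [x]) ++ [p]) := by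
  rw [List.isChain_append]
  refine ⟨hc, List.IsChain.singleton p, ?_⟩
  intro a ha b hb
  simp at ha hb
  subst ha hb
  exact hstep

-- the inner loop only writes slot ni; it computes a running value there
lemma pv_setloop (A B : Int → Prop) [DecidablePred A] [DecidablePred B] (ni : Nat)
    (js : List Int) (hjs : ∀ j ∈ js, 0 ≤ j ∧ j < (ni : Int)) :
    ∀ g : List Int, ni < g.length →
    js.foldl (fun f j =>
        if A j ∧ PySem.List.pyGetD f (ni : Int) 0 < PySem.List.pyGetD f j 0 + 1 ∧ B j
        then PySem.List.pySetD f (ni : Int) (PySem.List.pyGetD f j 0 + 1) else f) g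
      = g.set ni (js.foldl (fun v j =>
          if A j ∧ v < PySem.List.pyGetD g j 0 + 1 ∧ B j
          then PySem.List.pyGetD g j 0 + 1 else v) (PySem.List.pyGetD g (ni : Int) 0)) := by
  induction js with
  | nil =>
    intro g hg
    simp only [List.foldl_nil]
    rw [PySem.List.pyGetD_natCast, List.getD_eq_getElem g 0 hg]
    exact (List.set_getElem_self hg).symm
  | cons j js ih =>
    intro g hg
    have hj0 : 0 ≤ j ∧ j < (ni : Int) := hjs j (by simp)
    have hjs' : ∀ j' ∈ js, 0 ≤ j' ∧ j' < (ni : Int) := fun j' hj' => hjs j' (by simp [hj'])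
    simp only [List.foldl_cons]
    by_cases hcond : A j ∧ PySem.List.pyGetD g (ni : Int) 0 < PySem.List.pyGetD g j 0 + 1 ∧ B j
    · rw [if_pos hcond, if_pos hcond]
      have hlen' : ni < (PySem.List.pySetD g (ni : Int) (PySem.List.pyGetD g j 0 + 1)).length := by
        rw [PySem.List.length_pySetD]; exact hg
      rw [ih hjs' _ hlen']
      set g' := PySem.List.pySetD g (ni : Int) (PySem.List.pyGetD g j 0 + 1) with hg'
      have hgets : ∀ j' : Int, 0 ≤ j' → j' < (ni : Int) →
          PySem.List.pyGetD g' j' 0 = PySem.List.pyGetD g j' 0 := by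
        intro j' h0 hlt
        have : j' = ((j'.toNat : Nat) : Int) := by omega
        rw [this, hg', PySem.List.pyGetD_pySetD_natCast _ _ _ _ _ hg, if_neg (by omega)]
      have hgetni : PySem.List.pyGetD g' (ni : Int) 0 = PySem.List.pyGetD g j 0 + 1 := by
        rw [hg', PySem.List.pyGetD_pySetD_natCast _ _ _ _ _ hg, if_pos rfl]
      rw [hgetni]
      have hfold : ∀ v0, js.foldl (fun v j' =>
            if A j' ∧ v < PySem.List.pyGetD g' j' 0 + 1 ∧ B j'
            then PySem.List.pyGetD g' j' 0 + 1 else v) v0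
          = js.foldl (fun v j' =>
            if A j' ∧ v < PySem.List.pyGetD g j' 0 + 1 ∧ B j'
            then PySem.List.pyGetD g j' 0 + 1 else v) v0 := by
        intro v0
        apply PySem.List.foldl_congr_mem
        intro acc x hx
        rw [hgets x (hjs' x hx).1 (hjs' x hx).2]
      rw [hfold]
      rw [hg', PySem.List.pySetD_natCast, List.set_set]
    · rw [if_neg hcond, if_neg hcond]
      exact ih hjs' g hg

lemma pv_foldl_max_attain (l : List Nat) (w : Nat → Int) (v0 : Int) :
    l.foldl (fun v j => max v (w j)) v0 = v0 ∨ ∃ j ∈ l, l.foldl (fun v j => max v (w j)) v0 = w j := by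
  induction l generalizing v0 with
  | nil => simp
  | cons a l ih =>
    simp only [List.foldl_cons]
    rcases ih (max v0 (w a)) with h | ⟨j, hj, hval⟩
    · rcases max_choice v0 (w a) with hm | hm
      · left; rw [h, hm]
      · right; exact ⟨a, by simp, by rw [h, hm]⟩
    · right; exact ⟨j, by simp [hj], hval⟩

-- the A-side invariant
def pvInvA (S : List (Int × Int)) (k : Nat) (f : List Int) : Prop :=
  f.length = S.length
  ∧ (∀ j, k ≤ j → j < S.length → f.getD j 0 = 1)
  ∧ (∀ j, (hj : j < S.length) → j < k → ∃ m, (m ++ [S[j]]).Sublist (S.take (j+1))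
        ∧ List.IsChain pvStepA (m ++ [S[j]]) ∧ f.getD j 0 = (m.length : Int) + 1)
  ∧ (∀ c x, (c ++ [x]).Sublist (S.take k) → List.IsChain pvStepA (c ++ [x]) →
        ∃ j, ∃ (hj : j < S.length), j < k ∧ S[j] = x ∧ (c.length : Int) + 1 ≤ f.getD j 0)

lemma pvInvA_base (S : List (Int × Int)) (h1 : 1 ≤ S.length) :
    pvInvA S 1 (List.replicate S.length 1) := by
  have hrep : ∀ j, j < S.length → (List.replicate S.length (1 : Int)).getD j 0 = 1 := by
    intro j hj
    rw [List.getD_eq_getElem _ _ (by simpa using hj)]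
    simp
  refine ⟨by simp, fun j _ hj => hrep j hj, ?_, ?_⟩
  · intro j hj hj1
    have hj0 : j = 0 := by omega
    subst hj0
    refine ⟨[], ?_, by simpa using List.IsChain.singleton _, by rw [hrep 0 hj]; simp⟩
    rw [List.take_succ_eq_append_getElem hj]
    simpa using (List.nil_sublist _).append (List.Sublist.refl _)
  · intro c x hs hc
    have h0 : 0 < S.length := by omega
    rw [List.take_succ_eq_append_getElem h0] at hs
    simp only [List.take_zero, List.nil_append] at hs
    have hs2 : (c ++ [x]).Sublist ([] ++ [S[0]]) := by simpa using hs
    rcases pv_concat_sublist_concat hs2 with hs' | ⟨hxp, hs'⟩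
    · rw [List.sublist_nil] at hs'; simp at hs'
    · rw [List.sublist_nil] at hs'
      subst hs' hxp
      exact ⟨0, h0, by omega, rfl, by rw [hrep 0 h0]; simp⟩

lemma pvInvA_step (S : List (Int × Int)) (k : Nat) (f : List Int)
    (hkn : k < S.length) (hInv : pvInvA S k f) (V : Int)
    (hVlb : (1 : Int) ≤ V)
    (hVub : ∀ j, (hj : j < S.length) → j < k → pvStepA S[j] S[k] → f.getD j 0 + 1 ≤ V)
    (hVatt : V = 1 ∨ ∃ j, ∃ (hj : j < S.length), j < k ∧ pvStepA S[j] S[k] ∧ V = f.getD j 0 + 1) :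
    pvInvA S (k+1) (f.set k V) := by
  obtain ⟨hlen, hone, hwit, hub⟩ := hInv
  have hkf : k < f.length := by omega
  have hgetk : (f.set k V).getD k 0 = V := by
    rw [List.getD_eq_getElem _ _ (by simpa using hkf), List.getElem_set, if_pos rfl]
  have hgetne : ∀ j, j < S.length → j ≠ k → (f.set k V).getD j 0 = f.getD j 0 := by
    intro j hj hne
    rw [List.getD_eq_getElem _ _ (by simpa using (by omega : j < f.length)),
      List.getElem_set, if_neg (by omega), List.getD_eq_getElem _ _ (by omega)]
  refine ⟨by simpa using hlen, ?_, ?_, ?_⟩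
  · intro j hj hj'
    rw [hgetne j hj' (by omega)]
    exact hone j (by omega) hj'
  · intro j hj hjk
    rcases Nat.lt_or_ge j k with hlt | hge
    · obtain ⟨m, hs, hc, hv⟩ := hwit j hj hlt
      exact ⟨m, hs, hc, by rw [hgetne j hj (by omega)]; exact hv⟩
    · have hjeq : j = k := by omega
      subst hjeq
      rcases hVatt with hV1 | ⟨j', hj', hj'k, hstep, hVeq⟩
      · refine ⟨[], ?_, by simpa using List.IsChain.singleton _, by rw [hgetk, hV1]; simp⟩
        rw [List.take_succ_eq_append_getElem hj]
        exact (List.nil_sublist _).append (List.Sublist.refl _)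
      · obtain ⟨m, hs, hc, hv⟩ := hwit j' hj' hj'k
        refine ⟨m ++ [S[j']], ?_, pv_chain_snoc _ _ _ hc hstep, ?_⟩
        · rw [List.take_succ_eq_append_getElem hj]
          exact (hs.trans (List.take_sublist_take_left (by omega))).append (List.Sublist.refl _)
        · rw [hgetk, hVeq, hv]
          simp
  · intro c x hs hc
    rw [List.take_succ_eq_append_getElem hkn] at hs
    rcases pv_concat_sublist_concat hs with hs' | ⟨hxp, hs'⟩
    · obtain ⟨j, hj, hjk, hjx, hjle⟩ := hub c x hs' hc
      exact ⟨j, hj, by omega, hjx, by rw [hgetne j hj (by omega)]; exact hjle⟩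
    · subst hxp
      refine ⟨k, hkn, by omega, rfl, ?_⟩
      rw [hgetk]
      rcases List.eq_nil_or_concat' c with rfl | ⟨c', y, rfl⟩
      · simpa using hVlb
      · have hdec := List.isChain_append.mp hc
        have hstep : pvStepA y S[k] := by
          have := hdec.2.2
          simp at this
          exact this
        obtain ⟨j', hj', hj'k, hjy, hjle⟩ := hub c' y hs' hdec.1
        have hstep' : pvStepA S[j'] S[k] := by rw [hjy]; exact hstep
        have := hVub j' hj' hj'k hstep'
        simp only [List.length_append, List.length_singleton]
        push_cast
        omega

def pvOuterBody (S : List (Int × Int)) : List Int → Int → List Int :=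
  fun f i => (PySem.List.pyRange 0 i 1).foldl
    (fun f j => if (PySem.List.pyGetD S i (0, 0)).2 < (PySem.List.pyGetD S j (0, 0)).2
        ∧ PySem.List.pyGetD f i 0 < PySem.List.pyGetD f j 0 + 1
        ∧ (PySem.List.pyGetD S i (0, 0)).1 ≠ (PySem.List.pyGetD S j (0, 0)).1
      then PySem.List.pySetD f i (PySem.List.pyGetD f j 0 + 1) else f) f

lemma pv_innerV (S : List (Int × Int)) (k : Nat) (f : List Int)
    (hkn : k < S.length) (hlen : f.length = S.length) (hfk : f.getD k 0 = 1) :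
    ∃ V : Int,
      ((PySem.List.pyRange 0 (k : Int) 1).foldl (fun f j =>
          if (PySem.List.pyGetD S (k : Int) (0, 0)).2 < (PySem.List.pyGetD S j (0, 0)).2
              ∧ PySem.List.pyGetD f (k : Int) 0 < PySem.List.pyGetD f j 0 + 1
              ∧ (PySem.List.pyGetD S (k : Int) (0, 0)).1 ≠ (PySem.List.pyGetD S j (0, 0)).1
          then PySem.List.pySetD f (k : Int) (PySem.List.pyGetD f j 0 + 1) else f) f
        = f.set k V)
      ∧ (1 : Int) ≤ V
      ∧ (∀ j, (hj : j < S.length) → j < k → pvStepA S[j] S[k] → f.getD j 0 + 1 ≤ V)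
      ∧ (V = 1 ∨ ∃ j, ∃ (hj : j < S.length), j < k ∧ pvStepA S[j] S[k] ∧ V = f.getD j 0 + 1) := by
  have hjs : ∀ j ∈ PySem.List.pyRange 0 (k : Int) 1, 0 ≤ j ∧ j < (k : Int) := by
    intro j hj
    have := PySem.List.mem_pyRange_one.mp hj
    omega
  have hset := pv_setloop
    (fun j => (PySem.List.pyGetD S (k : Int) (0, 0)).2 < (PySem.List.pyGetD S j (0, 0)).2)
    (fun j => (PySem.List.pyGetD S (k : Int) (0, 0)).1 ≠ (PySem.List.pyGetD S j (0, 0)).1)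
    k (PySem.List.pyRange 0 (k : Int) 1) hjs f (by omega)
  refine ⟨_, hset, ?_⟩
  have hstart : PySem.List.pyGetD f (k : Int) 0 = 1 := by
    rw [PySem.List.pyGetD_natCast]; exact hfk
  have hQiff : ∀ j, ∀ (hjk : j < k),
      (((S.getD k (0, 0)).2 < (S.getD j (0, 0)).2 ∧ (S.getD k (0, 0)).1 ≠ (S.getD j (0, 0)).1)
        ↔ pvStepA (S[j]'(by omega)) (S[k]'hkn)) := by
    intro j hjk
    rw [List.getD_eq_getElem _ _ hkn, List.getD_eq_getElem _ _ (by omega : j < S.length)]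
    exact Iff.rfl
  rw [hstart, PySem.List.pyRange_zero_natCast, List.foldl_map]
  have hcongr : (List.range k).foldl (fun v j =>
        if (PySem.List.pyGetD S (k : Int) (0, 0)).2 < (PySem.List.pyGetD S ((j : Nat) : Int) (0, 0)).2
            ∧ v < PySem.List.pyGetD f ((j : Nat) : Int) 0 + 1
            ∧ (PySem.List.pyGetD S (k : Int) (0, 0)).1 ≠ (PySem.List.pyGetD S ((j : Nat) : Int) (0, 0)).1
        then PySem.List.pyGetD f ((j : Nat) : Int) 0 + 1 else v) 1
      = (List.range k).foldl (fun v j =>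
        if (S.getD k (0, 0)).2 < (S.getD j (0, 0)).2 ∧ (S.getD k (0, 0)).1 ≠ (S.getD j (0, 0)).1
        then max v (f.getD j 0 + 1) else v) 1 := by
    apply PySem.List.foldl_congr_mem
    intro acc j hj
    rw [PySem.List.pyGetD_natCast S k, PySem.List.pyGetD_natCast S j, PySem.List.pyGetD_natCast f j]
    by_cases hA : (S.getD k (0, 0)).2 < (S.getD j (0, 0)).2
    · by_cases hB : (S.getD k (0, 0)).1 ≠ (S.getD j (0, 0)).1
      · by_cases hv : acc < f.getD j 0 + 1
        · rw [if_pos ⟨hA, hv, hB⟩, if_pos ⟨hA, hB⟩]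
          exact (max_eq_right (le_of_lt hv)).symm
        · rw [if_neg (fun hcon => hv hcon.2.1), if_pos ⟨hA, hB⟩]
          exact (max_eq_left (by omega)).symm
      · rw [if_neg (by tauto), if_neg (by tauto)]
    · rw [if_neg (by tauto), if_neg (by tauto)]
  rw [hcongr,
    PySem.List.foldl_ite_eq_foldl_filter
      (fun j => (S.getD k (0, 0)).2 < (S.getD j (0, 0)).2 ∧ (S.getD k (0, 0)).1 ≠ (S.getD j (0, 0)).1)
      (fun v j => max v (f.getD j 0 + 1)) (List.range k) 1]
  set L := (List.range k).filter
    (fun j => decide ((S.getD k (0, 0)).2 < (S.getD j (0, 0)).2 ∧ (S.getD k (0, 0)).1 ≠ (S.getD j (0, 0)).1)) with hL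
  have hmemL : ∀ j, j ∈ L ↔ (j < k ∧
      (S.getD k (0, 0)).2 < (S.getD j (0, 0)).2 ∧ (S.getD k (0, 0)).1 ≠ (S.getD j (0, 0)).1) := by
    intro j
    rw [hL, List.mem_filter, List.mem_range, decide_eq_true_eq]
  obtain ⟨hlb, hub⟩ := PySem.List.le_foldl_max_int L (fun j => f.getD j 0 + 1) 1
  refine ⟨hlb, ?_, ?_⟩
  · intro j hj hjk hP
    exact hub j ((hmemL j).mpr ⟨hjk, (hQiff j hjk).mpr hP⟩)
  · rcases pv_foldl_max_attain L (fun j => f.getD j 0 + 1) 1 with h | ⟨j, hjL, hval⟩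
    · left; exact h
    · right
      obtain ⟨h1, h2⟩ := (hmemL j).mp hjL
      exact ⟨j, by omega, h1, (hQiff j h1).mp h2, hval⟩

lemma pv_outer (S : List (Int × Int)) (h1 : 1 ≤ S.length) :
    ∀ k, 1 ≤ k → k ≤ S.length →
    pvInvA S k ((PySem.List.pyRange 1 (k : Int) 1).foldl (pvOuterBody S)
      (List.replicate S.length 1)) := by
  intro k
  induction k with
  | zero => omega
  | succ k ih =>
    intro _ hkn
    rcases Nat.eq_zero_or_pos k with rfl | hk1
    · rw [show ((0 + 1 : Nat) : Int) = 1 by norm_num, PySem.List.pyRange_one_eq_nil (by omega)]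
      simpa using pvInvA_base S h1
    · have hInv := ih hk1 (by omega)
      have hkS : k < S.length := by omega
      have hrange : PySem.List.pyRange 1 ((k + 1 : Nat) : Int) 1
          = PySem.List.pyRange 1 (k : Int) 1 ++ [(k : Int)] := by
        rw [show ((k + 1 : Nat) : Int) = (k : Int) + 1 by push_cast; ring]
        exact PySem.List.pyRange_one_succ_right (by omega)
      rw [hrange, List.foldl_append]
      revert hInv
      generalize (PySem.List.pyRange 1 (k : Int) 1).foldl (pvOuterBody S)
        (List.replicate S.length 1) = f
      intro hInv
      obtain ⟨hlen, hone, hwit, hub⟩ := hInv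
      obtain ⟨V, hVeq, hVlb, hVub, hVatt⟩ := pv_innerV S k f hkS hlen (hone k (le_refl k) hkS)
      simp only [List.foldl_cons, List.foldl_nil, pvOuterBody]
      rw [hVeq]
      exact pvInvA_step S k f hkS ⟨hlen, hone, hwit, hub⟩ V hVlb hVub hVatt

lemma pv_sorted2_eq_sorted (xs : List (Int × Int)) (k1 k2 : (Int × Int) → Int) (rev : Bool) :
    PySem.List.sorted2 xs k1 k2 rev
      = PySem.List.sorted xs (fun x => toLex (k1 x, k2 x)) rev := by
  have hpt : ∀ a b : Int × Int,
      (decide (k1 a < k1 b) || (!decide (k1 b < k1 a) && decide (k2 a < k2 b)))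
        = decide (toLex (k1 a, k2 a) < toLex (k1 b, k2 b)) := by
    intro a b
    have hiff : (toLex (k1 a, k2 a) < toLex (k1 b, k2 b)) ↔ (k1 a < k1 b ∨ (k1 a = k1 b ∧ k2 a < k2 b)) :=
      Prod.Lex.toLex_lt_toLex
    by_cases h1 : k1 a < k1 b <;> by_cases h2 : k1 b < k1 a <;> by_cases h3 : k2 a < k2 b <;>
      simp [hiff, h1, h2, h3] <;> omega
  simp only [PySem.List.sorted2, PySem.List.sorted]
  cases rev <;> simp only [hpt]

lemma pv_len_SA (T : List (Int × Int)) : (pvSA T).length = T.length :=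
  (PySem.List.sorted_perm T _ true).length_eq

lemma pv_A_main (T : List (Int × Int)) (hT : T ≠ []) :
    ∃ f : List Int, pvInvA (pvSA T) (pvSA T).length f
      ∧ matrioszki T = (PySem.List.max? f (fun x => x)).getD 0 := by
  have h1 : 1 ≤ (pvSA T).length := by
    rw [pv_len_SA]
    exact List.length_pos_of_ne_nil hT
  refine ⟨_, pv_outer (pvSA T) h1 (pvSA T).length h1 (le_refl _), ?_⟩
  show matrioszki T = _
  unfold matrioszki
  rw [pv_sorted2_eq_sorted T Prod.fst Prod.snd true]
  simp only [PySem.List.len_eq, PySem.List.pyRepeat_singleton, Int.toNat_natCast]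
  rfl

lemma pv_A_wit (T : List (Int × Int)) (hT : T ≠ []) :
    ∃ c, c.Sublist (pvSA T) ∧ List.IsChain pvStepA c ∧ (c.length : Int) = matrioszki T := by
  obtain ⟨f, ⟨hflen, hone, hwit, hub⟩, heq⟩ := pv_A_main T hT
  have h1 : 1 ≤ (pvSA T).length := by
    rw [pv_len_SA]
    exact List.length_pos_of_ne_nil hT
  have hfne : f ≠ [] := by
    intro h
    rw [h] at hflen
    simp at hflen
    omega
  obtain ⟨v, hv⟩ : ∃ v, PySem.List.max? f (fun x => x) = some v := by
    cases hmax : PySem.List.max? f (fun x => x) with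
    | none => rw [PySem.List.max?_eq_none_iff] at hmax; exact absurd hmax hfne
    | some v => exact ⟨v, rfl⟩
  obtain ⟨j, hjf, hjv⟩ := List.mem_iff_getElem.mp (PySem.List.max?_mem hv)
  have hjS : j < (pvSA T).length := by omega
  obtain ⟨m, hs, hc, hval⟩ := hwit j hjS (by omega)
  refine ⟨m ++ [(pvSA T)[j]], hs.trans (List.take_sublist _ _), hc, ?_⟩
  rw [heq, hv]
  simp only [Option.getD_some]
  have hgd : f.getD j 0 = v := by
    rw [List.getD_eq_getElem _ _ (by omega)]
    exact hjv
  rw [hgd] at hval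
  simp only [List.length_append, List.length_singleton]
  push_cast
  omega

lemma pv_A_ub (T : List (Int × Int)) (hT : T ≠ []) :
    ∀ c, c.Sublist (pvSA T) → List.IsChain pvStepA c → (c.length : Int) ≤ matrioszki T := by
  obtain ⟨f, ⟨hflen, hone, hwit, hub⟩, heq⟩ := pv_A_main T hT
  have h1 : 1 ≤ (pvSA T).length := by
    rw [pv_len_SA]
    exact List.length_pos_of_ne_nil hT
  have hfne : f ≠ [] := by
    intro h
    rw [h] at hflen
    simp at hflen
    omega
  obtain ⟨v, hv⟩ : ∃ v, PySem.List.max? f (fun x => x) = some v := by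
    cases hmax : PySem.List.max? f (fun x => x) with
    | none => rw [PySem.List.max?_eq_none_iff] at hmax; exact absurd hmax hfne
    | some v => exact ⟨v, rfl⟩
  have hmax := PySem.List.max?_isMax hv
  intro c hsc hcc
  rw [heq, hv, Option.getD_some]
  rcases List.eq_nil_or_concat' c with rfl | ⟨c', x, rfl⟩
  · obtain ⟨m, _, _, hval⟩ := hwit 0 (by omega) (by omega)
    have hmem : f.getD 0 0 ∈ f := by
      rw [List.getD_eq_getElem _ _ (by omega)]
      exact List.getElem_mem _
    have := hmax _ hmem
    simp only [List.length_nil]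
    have : (0:Int) ≤ f.getD 0 0 - 1 := by rw [hval]; push_cast; omega
    have := hmax _ hmem
    omega
  · have hub' := hub c' x (by rw [List.take_length]; exact hsc) hcc
    obtain ⟨j, hj, _, _, hle⟩ := hub'
    have hmem : f.getD j 0 ∈ f := by
      rw [List.getD_eq_getElem _ _ (by omega)]
      exact List.getElem_mem _
    have := hmax _ hmem
    simp only [List.length_append, List.length_singleton]
    push_cast
    omega

lemma pv_alt_eq (T : List (Int × Int)) :
    matrioszki_alt T = (((pvSB T).foldl pvTStep []).length : Int) := by
  unfold matrioszki_alt
  rw [pv_sorted2_eq_sorted T Prod.fst (fun p => -p.2) false]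
  simp only [PySem.List.len_eq]
  rfl

lemma pv_B_wit (T : List (Int × Int)) (hT : T ≠ []) :
    ∃ c, c.Sublist (pvSB T) ∧ List.IsChain pvStepB c ∧ (c.length : Int) = matrioszki_alt T := by
  obtain ⟨hpw, hne, hwit, hub⟩ := pvInvB_final (pvSB T)
  have hSne : pvSB T ≠ [] := by
    intro h
    unfold pvSB at h
    rw [PySem.List.sorted_eq_nil_iff] at h
    exact hT h
  have htne : ((pvSB T).foldl pvTStep []) ≠ [] := fun h => hSne (hne h)
  have hlpos : 0 < ((pvSB T).foldl pvTStep []).length := List.length_pos_of_ne_nil htne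
  obtain ⟨m, x, hs, hc, hlen, _⟩ := hwit (((pvSB T).foldl pvTStep []).length - 1) (by omega)
  refine ⟨m ++ [x], hs, hc, ?_⟩
  rw [pv_alt_eq]
  simp only [List.length_append, List.length_singleton]
  push_cast
  omega

lemma pv_B_ub (T : List (Int × Int)) :
    ∀ c, c.Sublist (pvSB T) → List.IsChain pvStepB c → (c.length : Int) ≤ matrioszki_alt T := by
  obtain ⟨hpw, hne, hwit, hub⟩ := pvInvB_final (pvSB T)
  intro c hs hc
  rw [pv_alt_eq]
  rcases List.eq_nil_or_concat' c with rfl | ⟨m, x, rfl⟩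
  · simp
  · obtain ⟨hlt, _⟩ := hub m x hs hc
    simp only [List.length_append, List.length_singleton]
    push_cast
    omega

-- ===== VERDICT (by name: the statement is the Claim_ definition above) =====
theorem matrioszki_spec : Claim_equal_matrioszki := by
  intro T _ hT
  unfold Spec_matrioszki
  apply le_antisymm
  · obtain ⟨c, hs, hc, hlen⟩ := pv_A_wit T hT
    obtain ⟨hs', hc'⟩ := pv_chain_A_to_B T c hs hc
    have := pv_B_ub T c.reverse hs' hc'
    simpa [hlen] using this
  · obtain ⟨c, hs, hc, hlen⟩ := pv_B_wit T hT
    obtain ⟨hs', hc'⟩ := pv_chain_B_to_A T c hs hc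
    have := pv_A_ub T hT c.reverse hs' hc'
    simpa [hlen] using this
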